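-- pv_equiv track=rewrite | github.com/umeshkhatiwada13/Python-practice | Advanced Python/Week 5.py | get_n_repeated
-- ===== SOURCE A (Python) =====
-- def get_n_repeated(input_array, repetition):
--     number_tracker = {}
--     for x in input_array:
--         number_tracker[x] = number_tracker.get(x, 0) + 1
--
--     result = []
--     for k, v in number_tracker.items():
--         if (repetition == v):
--             result.append(k)
--     return result
-- ===== SOURCE B (Python) =====
-- def get_n_repeated(input_array, repetition):
--     # Repeated partition-by-head: peel off the first element's whole
--     # equivalence class each round; no frequency table is ever built.
--     result = []
--     remaining = input_array
--     while remaining: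
--         head = remaining[0]
--         rest = [x for x in remaining if x != head]
--         if len(remaining) - len(rest) == repetition:
--             result.append(head)
--         remaining = rest
--     return result
-- ===== Notes on version B (the rewrite author's own statement) =====
-- stated objective: alternative
-- what changed: B builds no frequency table at all: it repeatedly partitions the remaining list by its first element (a comprehension filters that element's class out, its size is the length difference) and emits the head when the class size equals repetition; the list shrinks by one equivalence class per round.
import Mathlib
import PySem

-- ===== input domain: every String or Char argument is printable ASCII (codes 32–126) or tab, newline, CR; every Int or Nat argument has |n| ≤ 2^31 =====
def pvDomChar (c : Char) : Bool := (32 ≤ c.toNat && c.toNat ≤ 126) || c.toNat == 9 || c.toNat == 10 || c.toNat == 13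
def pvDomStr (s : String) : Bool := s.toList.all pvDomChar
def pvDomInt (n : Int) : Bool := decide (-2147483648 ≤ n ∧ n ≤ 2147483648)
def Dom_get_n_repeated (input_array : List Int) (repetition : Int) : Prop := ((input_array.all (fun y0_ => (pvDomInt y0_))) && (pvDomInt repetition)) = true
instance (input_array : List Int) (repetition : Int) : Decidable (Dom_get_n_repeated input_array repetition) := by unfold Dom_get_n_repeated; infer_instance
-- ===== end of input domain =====

-- B replaces A's frequency dictionary with repeated partition-by-head filtering of the remaining list (no count table); objective: alternative.


-- ===== PORT A =====
def get_n_repeated (input_array : List Int) (repetition : Int) : List Int :=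
  let number_tracker :=
    input_array.foldl (fun d x => d.insert x (d.getD x 0 + 1)) (PySem.Dict.empty : PySem.Dict Int Int)
  number_tracker.items.foldl (fun result kv => if repetition == kv.2 then result ++ [kv.1] else result) []

-- ===== PORT B =====
-- helper cited by pvLoopB's termination proof
theorem pvRestB_length_lt (head : Int) (tail : List Int) :
    ((head :: tail).filter (fun x => !(x == head))).length < (head :: tail).length := by
  simpa [List.filter_cons] using Nat.lt_succ_of_le (List.length_filter_le (fun x => !(x == head)) tail)

-- while loop of Source B: rest is the comprehension, the class size is len(remaining) - len(rest)
def pvLoopB (remaining : List Int) (repetition : Int) (result : List Int) : List Int :=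
  match remaining with
  | [] => result
  | head :: tail =>
    let rest := (head :: tail).filter (fun x => !(x == head))
    pvLoopB rest repetition
      (if ((head :: tail).length : Int) - (rest.length : Int) == repetition then result ++ [head] else result)
termination_by remaining.length
decreasing_by exact pvRestB_length_lt head tail

def get_n_repeated_alt (input_array : List Int) (repetition : Int) : List Int :=
  pvLoopB input_array repetition []

-- ===== PRECONDITION & SPEC =====
def Spec_get_n_repeated (input_array : List Int) (repetition : Int) (out : List Int) : Prop := out = get_n_repeated_alt input_array repetition
instance (input_array : List Int) (repetition : Int) (out : List Int) : Decidable (Spec_get_n_repeated input_array repetition out) := by unfold Spec_get_n_repeated; infer_instance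

-- ===== CLAIM =====
def Claim_equal_get_n_repeated : Prop := ∀ (input_array : List Int) (repetition : Int), Dom_get_n_repeated input_array repetition → Spec_get_n_repeated input_array repetition (get_n_repeated input_array repetition)

-- ===== LEMMAS AND PROOFS =====

theorem ofList_cons_filter (h : Int) (t : List Int) :
    PySem.Set.ofList (h :: t) = h :: PySem.Set.ofList (t.filter (fun x => !(x == h))) := by
  have skip : ∀ (l : List Int) (s : PySem.Set Int), h ∈ s →
      l.foldl PySem.Set.add s = (l.filter (fun x => !(x == h))).foldl PySem.Set.add s := by
    intro l
    induction l with
    | nil => intro s _; rfl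
    | cons x t ih =>
      intro s hs
      by_cases hx : (x == h) = true
      · have : PySem.Set.add s x = s := by
          simp [PySem.Set.add, PySem.Set.contains, eq_of_beq hx]
          exact hs
        simp [hx, List.foldl_cons, this, ih s hs]
      · simp [hx, List.foldl_cons]
        refine ih _ ?_
        simp [PySem.Set.add]; split <;> simp [hs]
  have lift : ∀ (l : List Int) (s : List Int), (∀ x ∈ l, (x == h) = false) →
      l.foldl PySem.Set.add (h :: s) = h :: l.foldl PySem.Set.add s := by
    intro l
    induction l with
    | nil => intro s _; rfl
    | cons x t ih =>
      intro s hl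
      have hx : (x == h) = false := hl x (by simp)
      have hadd : PySem.Set.add (h :: s) x = h :: PySem.Set.add s x := by
        simp [PySem.Set.add, PySem.Set.contains]
        have : ¬ x = h := by simpa using hx
        split <;> rename_i hc
        · rw [if_pos]; rcases hc with hc | hc
          · exact absurd hc this
          · exact hc
        · rw [if_neg]; intro hc2; exact hc (Or.inr hc2)
      rw [List.foldl_cons, hadd, List.foldl_cons]
      exact ih _ (fun y hy => hl y (by simp [hy]))
  have h1 : PySem.Set.ofList (h :: t) = t.foldl PySem.Set.add [h] := by
    simp [PySem.Set.ofList_eq_foldl, List.foldl_cons, PySem.Set.add]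
  rw [h1, skip t [h] (by simp), lift _ [] (fun x hx => by simpa using (List.of_mem_filter hx))]
  rw [PySem.Set.ofList_eq_foldl]

theorem pvLoopB_spec (l : List Int) (r : Int) (acc : List Int) :
    pvLoopB l r acc = acc ++ (PySem.Set.ofList l).filter (fun x => ((l.count x : Int) == r)) := by
  induction hn : l.length using Nat.strong_induction_on generalizing l acc with
  | _ n ih =>
  match l with
  | [] => rw [pvLoopB.eq_def]; simp
  | h :: t =>
    rw [pvLoopB.eq_def]
    have hcnt : ((h :: t).length : Int) - (((h :: t).filter (fun x => !(x == h))).length : Int)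
        = ((h :: t).count h : Int) := by
      have key : ∀ (l : List Int), l.count h + (l.filter (fun x => !(x == h))).length = l.length := by
        intro l
        induction l with
        | nil => rfl
        | cons x t2 ih =>
          by_cases hx : (x == h) = true
          · simp [List.count_cons, List.filter_cons, hx, eq_of_beq hx]
            omega
          · have hne : ¬ x = h := fun h2 => hx (by simp [h2])
            simp [List.count_cons, List.filter_cons, hx, hne]
            omega
      have := key (h :: t)
      omega
    simp only [hcnt]
    have hrest : (h :: t).filter (fun x => !(x == h)) = t.filter (fun x => !(x == h)) := by
      simp
    have hlen : (t.filter (fun x => !(x == h))).length < n := by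
      subst hn; simp only [List.length_cons]
      exact Nat.lt_succ_of_le (List.length_filter_le _ _)
    simp only [hrest]
    rw [ih _ hlen _ _ rfl]
    have hcount : ∀ x ∈ PySem.Set.ofList (t.filter (fun y => !(y == h))),
        ((t.filter (fun y => !(y == h))).count x : Int) = ((h :: t).count x : Int) := by
      intro x hx
      have hxr : x ∈ t.filter (fun y => !(y == h)) := by
        simpa [PySem.Set.mem_ofList] using hx
      have hxh : (x == h) = false := by simpa using List.of_mem_filter hxr
      have hne : ¬ x = h := by simpa using hxh
      rw [List.count_filter (by simpa using hxh), List.count_cons]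
      simp [Ne.symm hne]
    have hfilter : (PySem.Set.ofList (t.filter (fun y => !(y == h)))).filter
          (fun x => (((t.filter (fun y => !(y == h))).count x : Int) == r))
        = (PySem.Set.ofList (t.filter (fun y => !(y == h)))).filter
          (fun x => (((h :: t).count x : Int) == r)) := by
      apply List.filter_congr
      intro x hx
      rw [hcount x hx]
    rw [hfilter, ofList_cons_filter, List.filter_cons]
    by_cases hc : (((h :: t).count h : Int) == r) = true
    · simp only [hc, if_true, List.append_assoc, List.singleton_append]
    · simp only [hc, if_false, Bool.false_eq_true]

-- A as the dedup-filter normal form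
theorem getA_spec (l : List Int) (r : Int) :
    get_n_repeated l r = (PySem.Set.ofList l).filter (fun x => ((l.count x : Int) == r)) := by
  unfold get_n_repeated
  simp only [PySem.Dict.foldl_insert_getD_add_one_eq_counter, PySem.Dict.items_counter,
    PySem.List.foldl_append_if, List.nil_append, List.filter_map]
  rw [List.map_map]
  simp only [Function.comp_def, List.map_id_fun', id]
  congr 1
  funext x
  exact decide_eq_decide.mpr eq_comm

-- ===== VERDICT =====
theorem get_n_repeated_spec : Claim_equal_get_n_repeated := by
  intro input_array repetition _
  unfold Spec_get_n_repeated get_n_repeated_alt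
  rw [getA_spec, pvLoopB_spec]
  simp
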